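-- pv_equiv track=rewrite | github.com/IAmLosingSanity/pyrofls | task2/2.py | count_friendly_elements
-- ===== SOURCE A (Python) =====
-- def count_friendly_elements(matrix):
--     rows = len(matrix)
--     cols = len(matrix[0]) if rows > 0 else 0
--     friendly_count = [[0 for _ in range(cols)] for _ in range(rows)]
--
--     def dfs(row, col, visited):
--         # Check if the current position is out of bounds or already visited
--         if row < 0 or col < 0 or row >= rows or col >= cols or visited[row][col]:
--             return 0
--
--         visited[row][col] = True  # Mark the current cell as visited
--
--         # Count of friendly elements
--         count = 1
--         # Directions: up, down, left, right
--         directions = [(0, -1), (0, 1), (-1, 0), (1, 0)]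
--
--         for dr, dc in directions:
--             new_row, new_col = row + dr, col + dc
--             # Check if the neighboring element has the same value and is not visited
--             if 0 <= new_row < rows and 0 <= new_col < cols and not visited[new_row][new_col] and matrix[new_row][new_col] == matrix[row][col]:
--                 count += dfs(new_row, new_col, visited)
--
--         return count
--
--     # Main loop to start DFS from each cell
--     for i in range(rows):
--         for j in range(cols):
--             if friendly_count[i][j] == 0:  # If not already counted
--                 visited = [[False for _ in range(cols)] for _ in range(rows)]
--                 friendly_count[i][j] = dfs(i, j, visited) - 1  # Exclude the element itself
--
--     return friendly_count
-- ===== SOURCE B (Python) =====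
-- def count_friendly_elements(matrix):
--     rows = len(matrix)
--     cols = len(matrix[0]) if rows > 0 else 0
--     result = [[0] * cols for _ in range(rows)]
--     seen = [[False] * cols for _ in range(rows)]
--     for i in range(rows):
--         for j in range(cols):
--             if not seen[i][j]:
--                 # flood-fill the whole component once, with an explicit stack
--                 seen[i][j] = True
--                 stack = [(i, j)]
--                 comp = []
--                 while stack:
--                     r, c = stack.pop()
--                     comp.append((r, c))
--                     for nr, nc in ((r, c - 1), (r, c + 1), (r - 1, c), (r + 1, c)):
--                         if 0 <= nr < rows and 0 <= nc < cols and not seen[nr][nc] and matrix[nr][nc] == matrix[r][c]: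
--                             seen[nr][nc] = True
--                             stack.append((nr, nc))
--                 size = len(comp) - 1
--                 for r, c in comp:
--                     result[r][c] = size
--     return result
-- ===== Notes on version B (the rewrite author's own statement) =====
-- stated objective: faster
-- what changed: Instead of running a fresh recursive DFS from every single cell, B flood-fills each same-value connected component exactly once with an explicit stack and writes size-1 to all of the component's cells.
import Mathlib
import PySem

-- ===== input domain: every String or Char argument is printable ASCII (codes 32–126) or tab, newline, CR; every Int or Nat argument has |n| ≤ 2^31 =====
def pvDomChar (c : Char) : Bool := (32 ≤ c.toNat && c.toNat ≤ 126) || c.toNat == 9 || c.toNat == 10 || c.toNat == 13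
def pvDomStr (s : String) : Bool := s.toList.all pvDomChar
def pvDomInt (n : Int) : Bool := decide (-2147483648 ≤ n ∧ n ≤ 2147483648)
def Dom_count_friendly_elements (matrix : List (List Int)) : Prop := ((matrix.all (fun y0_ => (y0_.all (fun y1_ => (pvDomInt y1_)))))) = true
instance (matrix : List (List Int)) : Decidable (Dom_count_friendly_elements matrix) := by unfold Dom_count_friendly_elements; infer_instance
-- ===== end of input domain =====

-- B replaces A's fresh recursive DFS per cell by a single explicit-stack flood fill per
-- same-value connected component, writing size-1 to all of the component's cells at once.
-- Neither program mutates its argument; the theorems are about the return value.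

-- ===== PORT A =====
-- shared 2-D list access helpers (Python's m[r][c] read / m[r][c] = x write; the ports
-- only use them after their own bounds checks, so the defaults are never observable)
def pvGet2 {α : Type} (g : List (List α)) (r c : Int) (dflt : α) : α :=
  (g.getD r.toNat []).getD c.toNat dflt

def pvSet2 {α : Type} (g : List (List α)) (r c : Int) (x : α) : List (List α) :=
  g.set r.toNat ((g.getD r.toNat []).set c.toNat x)

def pvMget (matrix : List (List Int)) (r c : Int) : Int := pvGet2 matrix r c 0

-- A's recursive dfs; `fuel` only makes the recursion structural (each real call
-- marks a fresh cell, so fuel rows*cols+1 is never exhausted); `visited` is threaded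
-- through the 4-direction loop exactly as Python mutates it in place.
def pvDfs (matrix : List (List Int)) (rows cols : Int) :
    Nat → Int → Int → List (List Bool) → Int × List (List Bool)
  | 0, _, _, visited => (0, visited)
  | fuel + 1, row, col, visited =>
    if row < 0 ∨ col < 0 ∨ rows ≤ row ∨ cols ≤ col then (0, visited)
    else if pvGet2 visited row col true then (0, visited)
    else
      let visited1 := pvSet2 visited row col true
      [((0 : Int), (-1 : Int)), (0, 1), (-1, 0), (1, 0)].foldl
        (fun (st : Int × List (List Bool)) d =>
          let nr := row + d.1
          let nc := col + d.2
          if 0 ≤ nr ∧ nr < rows ∧ 0 ≤ nc ∧ nc < cols ∧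
              pvGet2 st.2 nr nc true = false ∧
              pvMget matrix nr nc = pvMget matrix row col then
            let rec_ := pvDfs matrix rows cols fuel nr nc st.2
            (st.1 + rec_.1, rec_.2)
          else st)
        (1, visited1)

def count_friendly_elements (matrix : List (List Int)) : List (List Int) :=
  let rows : Int := (matrix.length : Int)
  let cols : Int := if 0 < rows then ((matrix.headD []).length : Int) else 0
  let init : List (List Int) :=
    List.replicate rows.toNat (List.replicate cols.toNat (0 : Int))
  (PySem.List.pyRange 0 rows 1).foldl
    (fun fc i =>
      (PySem.List.pyRange 0 cols 1).foldl
        (fun fc j =>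
          if pvGet2 fc i j 0 = 0 then
            let visited := List.replicate rows.toNat (List.replicate cols.toNat false)
            pvSet2 fc i j ((pvDfs matrix rows cols (rows.toNat * cols.toNat + 1) i j visited).1 - 1)
          else fc)
        fc)
    init

-- ===== PORT B =====
-- while-loop flood fill; the stack is kept top-first (Python keeps the top at the end
-- of the list); fuel 2*rows*cols+2 bounds the number of loop iterations.
def pvFlood (matrix : List (List Int)) (rows cols : Int) :
    Nat → List (Int × Int) → List (List Bool) → List (Int × Int) →
    List (List Bool) × List (Int × Int)
  | 0, _, seen, comp => (seen, comp)
  | fuel + 1, stack, seen, comp =>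
    match stack with
    | [] => (seen, comp)
    | (r, c) :: rest =>
      let comp1 := comp ++ [(r, c)]
      let st :=
        [(r, c - 1), (r, c + 1), (r - 1, c), (r + 1, c)].foldl
          (fun (st : List (List Bool) × List (Int × Int)) nb =>
            if 0 ≤ nb.1 ∧ nb.1 < rows ∧ 0 ≤ nb.2 ∧ nb.2 < cols ∧
                pvGet2 st.1 nb.1 nb.2 true = false ∧
                pvMget matrix nb.1 nb.2 = pvMget matrix r c then
              (pvSet2 st.1 nb.1 nb.2 true, nb :: st.2)
            else st)
          (seen, rest)
      pvFlood matrix rows cols fuel st.2 st.1 comp1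

def count_friendly_elements_alt (matrix : List (List Int)) : List (List Int) :=
  let rows : Int := (matrix.length : Int)
  let cols : Int := if 0 < rows then ((matrix.headD []).length : Int) else 0
  let init : List (List Int) :=
    List.replicate rows.toNat (List.replicate cols.toNat (0 : Int))
  let seen0 : List (List Bool) :=
    List.replicate rows.toNat (List.replicate cols.toNat false)
  ((PySem.List.pyRange 0 rows 1).foldl
    (fun (st : List (List Int) × List (List Bool)) i =>
      (PySem.List.pyRange 0 cols 1).foldl
        (fun (st : List (List Int) × List (List Bool)) j =>
          if pvGet2 st.2 i j true = false then
            let seen1 := pvSet2 st.2 i j true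
            let fl := pvFlood matrix rows cols (2 * rows.toNat * cols.toNat + 2) [(i, j)] seen1 []
            let size : Int := (fl.2.length : Int) - 1
            (fl.2.foldl (fun res rc => pvSet2 res rc.1 rc.2 size) st.1, fl.1)
          else st)
        st)
    (init, seen0)).1

-- ===== PRECONDITION & SPEC =====
-- Pre_ excludes exactly the ragged matrices in which some row is shorter than the first
-- row: on those Python A raises IndexError (and Python B raises IndexError there too).
def Pre_count_friendly_elements (matrix : List (List Int)) : Prop :=
  ∀ row ∈ matrix, (matrix.headD []).length ≤ row.length

instance (matrix : List (List Int)) : Decidable (Pre_count_friendly_elements matrix) := by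
  unfold Pre_count_friendly_elements; infer_instance

def pvWitness_count_friendly_elements : List (List Int) := [[1, 1], [1, 2]]

def Spec_count_friendly_elements (matrix : List (List Int)) (out : List (List Int)) : Prop :=
  out = count_friendly_elements_alt matrix

instance (matrix : List (List Int)) (out : List (List Int)) :
    Decidable (Spec_count_friendly_elements matrix out) := by
  unfold Spec_count_friendly_elements; infer_instance

-- ===== CLAIM (what is proved, stated in full; the proofs are below) =====
def Claim_equal_count_friendly_elements : Prop :=
  ∀ (matrix : List (List Int)), Dom_count_friendly_elements matrix →
    Pre_count_friendly_elements matrix →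
    Spec_count_friendly_elements matrix (count_friendly_elements matrix)

-- ===== LEMMAS AND PROOFS =====

-- generic avoided-set reachability
def pvStep {α : Type} (Ad : α → α → Prop) (S : Set α) (a b : α) : Prop := Ad a b ∧ b ∉ S

def pvReach {α : Type} (Ad : α → α → Prop) (Good : α → Prop) (S : Set α) (u : α) : Set α :=
  {v | Good u ∧ u ∉ S ∧ Relation.ReflTransGen (pvStep Ad S) u v}

theorem pvReach_empty_of_not_good {α : Type} {Ad : α → α → Prop} {Good : α → Prop} {S : Set α}
    {u : α} (h : ¬ Good u) : pvReach Ad Good S u = ∅ := by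
  ext v; simp [pvReach, h]

theorem pvReach_empty_of_mem {α : Type} {Ad : α → α → Prop} {Good : α → Prop} {S : Set α}
    {u : α} (h : u ∈ S) : pvReach Ad Good S u = ∅ := by
  ext v; simp [pvReach, h]

theorem pvReach_self {α : Type} {Ad : α → α → Prop} {Good : α → Prop} {S : Set α}
    {u : α} (hg : Good u) (hu : u ∉ S) : u ∈ pvReach Ad Good S u :=
  ⟨hg, hu, Relation.ReflTransGen.refl⟩

theorem pvRtg_notmem {α : Type} {Ad : α → α → Prop} {S : Set α} {a b : α}
    (h : Relation.ReflTransGen (pvStep Ad S) a b) (ha : a ∉ S) : b ∉ S := by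
  induction h with
  | refl => exact ha
  | tail _ hstep _ => exact hstep.2

theorem pvReach_notmem {α : Type} {Ad : α → α → Prop} {Good : α → Prop} {S : Set α}
    {u v : α} (hv : v ∈ pvReach Ad Good S u) : v ∉ S :=
  pvRtg_notmem hv.2.2 hv.2.1

theorem pvReach_good {α : Type} {Ad : α → α → Prop} {Good : α → Prop} {S : Set α}
    {u v : α} (hgood : ∀ a b, Ad a b → Good b) (hv : v ∈ pvReach Ad Good S u) : Good v := by
  obtain ⟨hg, _, hrtg⟩ := hv
  induction hrtg with
  | refl => exact hg
  | tail _ hstep _ => exact hgood _ _ hstep.1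

theorem pvReach_closed {α : Type} {Ad : α → α → Prop} {Good : α → Prop} {S : Set α}
    {u v w : α} (hv : v ∈ pvReach Ad Good S u) (hvw : Ad v w) (hw : w ∉ S) :
    w ∈ pvReach Ad Good S u :=
  ⟨hv.1, hv.2.1, hv.2.2.tail ⟨hvw, hw⟩⟩

theorem pvReach_anti {α : Type} {Ad : α → α → Prop} {Good : α → Prop} {S T : Set α}
    {u : α} (hST : S ⊆ T) : pvReach Ad Good T u ⊆ pvReach Ad Good S u := by
  intro v hv
  exact ⟨hv.1, fun h => hv.2.1 (hST h), hv.2.2.mono (fun a b hab => ⟨hab.1, fun h => hab.2 (hST h)⟩)⟩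

theorem pvRtg_reverse {α : Type} {Ad : α → α → Prop} {S : Set α} {a b : α}
    (hsymm : ∀ x y, Ad x y → Ad y x)
    (h : Relation.ReflTransGen (pvStep Ad S) a b) (ha : a ∉ S) :
    Relation.ReflTransGen (pvStep Ad S) b a := by
  induction h with
  | refl => exact Relation.ReflTransGen.refl
  | tail hwb hstep ih =>
    exact Relation.ReflTransGen.head ⟨hsymm _ _ hstep.1, pvRtg_notmem hwb ha⟩ ih

def pvSat {α : Type} (Ad : α → α → Prop) (S D : Set α) : Prop :=
  ∀ y ∈ D, ∀ w, Ad y w → w ∉ S → w ∈ D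

theorem pvSat_reach {α : Type} (Ad : α → α → Prop) (Good : α → Prop) (S : Set α) (u : α) :
    pvSat Ad S (pvReach Ad Good S u) :=
  fun _ hy _ haw hw => pvReach_closed hy haw hw

theorem pvSat_union {α : Type} {Ad : α → α → Prop} {S D E : Set α}
    (hD : pvSat Ad S D) (hE : pvSat Ad S E) : pvSat Ad S (D ∪ E) := by
  rintro y (hy | hy) w haw hw
  · exact Or.inl (hD y hy w haw hw)
  · exact Or.inr (hE y hy w haw hw)

theorem pvSat_absorb {α : Type} {Ad : α → α → Prop} {Good : α → Prop} {S D : Set α} {y : α}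
    (hD : pvSat Ad S D) (hy : y ∈ D) : pvReach Ad Good S y ⊆ D := by
  intro v hv
  obtain ⟨_, _, hrtg⟩ := hv
  induction hrtg with
  | refl => exact hy
  | tail _ hstep ih => exact hD _ ih _ hstep.1 hstep.2

theorem pvReach_disj_sat {α : Type} {Ad : α → α → Prop} {Good : α → Prop} {S D : Set α} {n : α}
    (hsymm : ∀ x y, Ad x y → Ad y x) (hgood : ∀ a b, Ad a b → Good b)
    (hD : pvSat Ad S D) (hn : n ∉ D) {v : α} (hv : v ∈ pvReach Ad Good S n) : v ∉ D := by
  intro hvD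
  have hrev : Relation.ReflTransGen (pvStep Ad S) v n := pvRtg_reverse hsymm hv.2.2 hv.2.1
  have hGoodv : Good v := pvReach_good hgood hv
  have : n ∈ pvReach Ad Good S v := ⟨hGoodv, pvReach_notmem hv, hrev⟩
  exact hn (pvSat_absorb hD hvD this)

theorem pvReach_avoid_union {α : Type} {Ad : α → α → Prop} {Good : α → Prop} {S D : Set α} {n : α}
    (hsymm : ∀ x y, Ad x y → Ad y x) (hgood : ∀ a b, Ad a b → Good b)
    (hD : pvSat Ad S D) (hn : n ∉ D) :
    pvReach Ad Good (S ∪ D) n = pvReach Ad Good S n := by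
  apply Set.Subset.antisymm (pvReach_anti Set.subset_union_left)
  intro v hv
  obtain ⟨hg, hnS, hrtg⟩ := hv
  refine ⟨hg, by simp [hnS, hn], ?_⟩
  induction hrtg with
  | refl => exact Relation.ReflTransGen.refl
  | @tail b c hb hstep ih =>
    refine Relation.ReflTransGen.tail ih ⟨hstep.1, ?_⟩
    have hvR : c ∈ pvReach Ad Good S n := ⟨hg, hnS, hb.tail hstep⟩
    have hvD : c ∉ D := pvReach_disj_sat hsymm hgood hD hn hvR
    simp [hstep.2, hvD]

theorem pvReach_comp_eq {α : Type} {Ad : α → α → Prop} {Good : α → Prop} {u v : α}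
    (hsymm : ∀ x y, Ad x y → Ad y x) (hgood : ∀ a b, Ad a b → Good b)
    (hv : v ∈ pvReach Ad Good ∅ u) :
    pvReach Ad Good (∅ : Set α) v = pvReach Ad Good (∅ : Set α) u := by
  apply Set.Subset.antisymm
  · exact pvSat_absorb (pvSat_reach Ad Good ∅ u) hv
  · have hu : u ∈ pvReach Ad Good (∅ : Set α) v :=
      ⟨pvReach_good hgood hv, Set.notMem_empty v, pvRtg_reverse hsymm hv.2.2 hv.2.1⟩
    exact pvSat_absorb (pvSat_reach Ad Good ∅ v) hu

theorem pvReach_decomp_mem {α : Type} {Ad : α → α → Prop} {Good : α → Prop} {S : Set α} {u v : α}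
    (hv : v ∈ pvReach Ad Good S u) (hgood : ∀ a b, Ad a b → Good b) :
    v = u ∨ ∃ n, Ad u n ∧ n ∉ S ∧ n ≠ u ∧ v ∈ pvReach Ad Good (S ∪ {u}) n := by
  obtain ⟨hg, huS, hrtg⟩ := hv
  induction hrtg with
  | refl => exact Or.inl rfl
  | @tail b c hb hstep ih =>
    rcases ih with heq | ⟨n, han, hnS, hnu, hwR⟩
    · by_cases hcu : c = u
      · exact Or.inl hcu
      · exact Or.inr ⟨c, heq ▸ hstep.1, hstep.2, hcu,
          pvReach_self (hgood _ _ hstep.1) (by simp [hstep.2, hcu])⟩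
    · by_cases hcu : c = u
      · exact Or.inl hcu
      · exact Or.inr ⟨n, han, hnS, hnu, pvReach_closed hwR hstep.1 (by simp [hstep.2, hcu])⟩

theorem pvReach_decomp_sup {α : Type} {Ad : α → α → Prop} {Good : α → Prop} {S : Set α} {u n : α}
    (hg : Good u) (hu : u ∉ S) (han : Ad u n) (hn : n ∉ S) (hnu : n ≠ u) :
    pvReach Ad Good (S ∪ {u}) n ⊆ pvReach Ad Good S u := by
  intro v hv
  obtain ⟨hgn, hnSU, hrtg⟩ := hv
  refine ⟨hg, hu, Relation.ReflTransGen.head ⟨han, hn⟩ ?_⟩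
  exact hrtg.mono (fun a b hab => ⟨hab.1, fun h => hab.2 (Or.inl h)⟩)




theorem myGetD_set_ne {α : Type} (l : List α) (i j : Nat) (x d : α) (h : i ≠ j) :
    (l.set i x).getD j d = l.getD j d := by
  rw [List.getD_eq_getElem?_getD, List.getElem?_set_ne h, ← List.getD_eq_getElem?_getD]

theorem myGetD_set_self {α : Type} (l : List α) (i : Nat) (x d : α) (h : i < l.length) :
    (l.set i x).getD i d = x := by
  rw [List.getD_eq_getElem?_getD, List.getElem?_set_self h]; rfl

theorem myGetD_mem {α : Type} (l : List α) (i : Nat) (d : α) (h : i < l.length) :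
    l.getD i d ∈ l := by
  rw [List.getD_eq_getElem _ _ h]; exact List.getElem_mem h

-- ===== grid abstraction =====
def pvInR (rows cols : Int) (u : Int × Int) : Prop :=
  0 ≤ u.1 ∧ u.1 < rows ∧ 0 ≤ u.2 ∧ u.2 < cols

def pvNbr (u v : Int × Int) : Prop :=
  (v.1 = u.1 ∧ (v.2 = u.2 - 1 ∨ v.2 = u.2 + 1)) ∨
  (v.2 = u.2 ∧ (v.1 = u.1 - 1 ∨ v.1 = u.1 + 1))

def pvAdj (m : List (List Int)) (rows cols : Int) (u v : Int × Int) : Prop :=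
  pvInR rows cols u ∧ pvInR rows cols v ∧ pvMget m v.1 v.2 = pvMget m u.1 u.2 ∧ pvNbr u v

theorem pvNbr_symm {u v : Int × Int} (h : pvNbr u v) : pvNbr v u := by
  rcases h with ⟨h1, h2 | h2⟩ | ⟨h1, h2 | h2⟩
  · exact Or.inl ⟨by omega, Or.inr (by omega)⟩
  · exact Or.inl ⟨by omega, Or.inl (by omega)⟩
  · exact Or.inr ⟨by omega, Or.inr (by omega)⟩
  · exact Or.inr ⟨by omega, Or.inl (by omega)⟩

theorem pvAdj_symm {m : List (List Int)} {R C : Int} {u v : Int × Int}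
    (h : pvAdj m R C u v) : pvAdj m R C v u :=
  ⟨h.2.1, h.1, h.2.2.1.symm, pvNbr_symm h.2.2.2⟩

theorem pvAdj_symm' (m : List (List Int)) (R C : Int) :
    ∀ u v : Int × Int, pvAdj m R C u v → pvAdj m R C v u := fun _ _ => pvAdj_symm

theorem pvAdj_good (m : List (List Int)) (R C : Int) :
    ∀ u v : Int × Int, pvAdj m R C u v → pvInR R C v := fun _ _ h => h.2.1

theorem pvNbr_mem_list {u n : Int × Int} (h : pvNbr u n) :
    n ∈ [(u.1, u.2 - 1), (u.1, u.2 + 1), (u.1 - 1, u.2), (u.1 + 1, u.2)] := by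
  rcases h with ⟨h1, h2 | h2⟩ | ⟨h1, h2 | h2⟩ <;> simp [Prod.ext_iff] <;> omega

def pvGrid (R C : Int) : Set (Int × Int) := {v | pvInR R C v}

theorem pvGrid_finite (R C : Int) : (pvGrid R C).Finite := by
  apply Set.Finite.subset (Finset.Icc (0 : Int) (R - 1) ×ˢ Finset.Icc (0 : Int) (C - 1)).finite_toSet
  rintro ⟨a, b⟩ h
  simp only [Finset.coe_product, Set.mem_prod, Finset.mem_coe, Finset.mem_Icc]
  obtain ⟨h1, h2, h3, h4⟩ := h
  omega

theorem pvGrid_ncard {R C : Int} (hR : 0 ≤ R) (hC : 0 ≤ C) :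
    (pvGrid R C).ncard = R.toNat * C.toNat := by
  have : pvGrid R C = ↑(Finset.Icc (0 : Int) (R - 1) ×ˢ Finset.Icc (0 : Int) (C - 1)) := by
    ext ⟨a, b⟩
    simp only [pvGrid, Set.mem_setOf_eq, Finset.coe_product, Set.mem_prod, Finset.mem_coe,
      Finset.mem_Icc, pvInR]
    omega
  rw [this, Set.ncard_coe_finset, Finset.card_product, Int.card_Icc, Int.card_Icc]
  have e1 : R - 1 + 1 - 0 = R := by ring
  have e2 : C - 1 + 1 - 0 = C := by ring
  rw [e1, e2]

theorem pvReach_subset_grid (m : List (List Int)) (R C : Int) (S : Set (Int × Int))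
    (u : Int × Int) : pvReach (pvAdj m R C) (pvInR R C) S u ⊆ pvGrid R C :=
  fun _ hv => pvReach_good (pvAdj_good m R C) hv

theorem pvReach_finite (m : List (List Int)) (R C : Int) (S : Set (Int × Int)) (u : Int × Int) :
    (pvReach (pvAdj m R C) (pvInR R C) S u).Finite :=
  (pvGrid_finite R C).subset (pvReach_subset_grid m R C S u)

-- ===== 2-D list bridges =====
def pvDims {α : Type} (R C : Int) (g : List (List α)) : Prop :=
  g.length = R.toNat ∧ ∀ row ∈ g, row.length = C.toNat

def pvVs (v : List (List Bool)) : Set (Int × Int) :=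
  {p | 0 ≤ p.1 ∧ 0 ≤ p.2 ∧ pvGet2 v p.1 p.2 false = true}

theorem pvDims_replicate {α : Type} (R C : Int) (x : α) :
    pvDims R C (List.replicate R.toNat (List.replicate C.toNat x)) := by
  constructor
  · simp
  · intro row hrow
    rw [List.eq_of_mem_replicate hrow]
    simp

theorem pvDims_set2 {α : Type} {R C : Int} {g : List (List α)} (hd : pvDims R C g)
    (r c : Int) (x : α) : pvDims R C (pvSet2 g r c x) := by
  obtain ⟨hlen, hrows⟩ := hd
  constructor
  · simp [pvSet2, hlen]
  · intro row hrow
    unfold pvSet2 at hrow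
    by_cases hr : r.toNat < g.length
    · rcases List.mem_or_eq_of_mem_set hrow with h | h
      · exact hrows row h
      · subst h
        rw [List.length_set]
        exact hrows _ (myGetD_mem g r.toNat [] hr)
    · rw [List.set_eq_of_length_le (by omega)] at hrow
      exact hrows row hrow

theorem pvGet2_set2_self {α : Type} {g : List (List α)} {r c : Int}
    (h1 : r.toNat < g.length) (h2 : c.toNat < (g.getD r.toNat []).length) (x : α) (d : α) :
    pvGet2 (pvSet2 g r c x) r c d = x := by
  unfold pvGet2 pvSet2
  rw [myGetD_set_self _ _ _ _ h1, myGetD_set_self _ _ _ _ (by simpa using h2)]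

theorem pvGet2_set2_ne {α : Type} {g : List (List α)} {r c r' c' : Int}
    (h : r'.toNat ≠ r.toNat ∨ c'.toNat ≠ c.toNat) (x : α) (d : α) :
    pvGet2 (pvSet2 g r c x) r' c' d = pvGet2 g r' c' d := by
  unfold pvGet2 pvSet2
  by_cases hr : r'.toNat = r.toNat
  · have hc : c'.toNat ≠ c.toNat := by tauto
    rw [hr]
    by_cases hlt : r.toNat < g.length
    · rw [myGetD_set_self _ _ _ _ hlt, myGetD_set_ne _ _ _ _ _ (Ne.symm hc)]
    · rw [List.set_eq_of_length_le (by omega)]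
  · rw [myGetD_set_ne _ _ _ _ _ (fun hh => hr hh.symm)]

theorem pvGet2_default {α : Type} {R C : Int} {g : List (List α)} (hd : pvDims R C g)
    {p : Int × Int} (hin : pvInR R C p) (d d' : α) :
    pvGet2 g p.1 p.2 d = pvGet2 g p.1 p.2 d' := by
  obtain ⟨h1, h2, h3, h4⟩ := hin
  have hr : p.1.toNat < g.length := by rw [hd.1]; omega
  have hc : p.2.toNat < (g[p.1.toNat]'hr).length := by
    rw [hd.2 _ (List.getElem_mem hr)]; omega
  unfold pvGet2
  rw [List.getD_eq_getElem _ _ hr, List.getD_eq_getElem _ _ hc, List.getD_eq_getElem _ _ hc]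

theorem mem_pvVs {R C : Int} {v : List (List Bool)} (hd : pvDims R C v)
    {p : Int × Int} (hin : pvInR R C p) :
    p ∈ pvVs v ↔ pvGet2 v p.1 p.2 true = true := by
  unfold pvVs
  simp only [Set.mem_setOf_eq, hin.1, hin.2.2.1, true_and]
  rw [pvGet2_default hd hin false true]

theorem notmem_pvVs {R C : Int} {v : List (List Bool)} (hd : pvDims R C v)
    {p : Int × Int} (hin : pvInR R C p) :
    p ∉ pvVs v ↔ pvGet2 v p.1 p.2 true = false := by
  rw [mem_pvVs hd hin]
  cases h : pvGet2 v p.1 p.2 true <;> simp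

theorem pvVs_replicate (a b : Nat) : pvVs (List.replicate a (List.replicate b false)) = ∅ := by
  ext p
  simp only [pvVs, Set.mem_setOf_eq, Set.mem_empty_iff_false, iff_false, not_and]
  intro _ _
  simp only [pvGet2, List.getD_eq_getElem?_getD, List.getElem?_replicate]
  split_ifs <;> simp

theorem pvVs_set2_true {R C : Int} {v : List (List Bool)} (hd : pvDims R C v)
    {p : Int × Int} (hin : pvInR R C p) :
    pvVs (pvSet2 v p.1 p.2 true) = pvVs v ∪ {p} := by
  obtain ⟨hp1, hp2, hp3, hp4⟩ := hin
  ext q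
  by_cases hq : q = p
  · subst hq
    have hr : q.1.toNat < v.length := by rw [hd.1]; omega
    have hc : q.2.toNat < (v.getD q.1.toNat []).length := by
      rw [List.getD_eq_getElem _ _ hr, hd.2 _ (List.getElem_mem hr)]; omega
    simp only [pvVs, Set.mem_setOf_eq, Set.mem_union, Set.mem_singleton_iff]
    rw [pvGet2_set2_self hr hc]
    simp [hp1, hp3]
  · by_cases hqn : 0 ≤ q.1 ∧ 0 ≤ q.2
    · have hne : q.1.toNat ≠ p.1.toNat ∨ q.2.toNat ≠ p.2.toNat := by
        rcases Prod.ext_iff.not.mp hq with h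
        by_contra hcon
        push_neg at hcon
        exact hq (Prod.ext_iff.mpr ⟨by omega, by omega⟩)
      simp only [pvVs, Set.mem_setOf_eq, Set.mem_union, Set.mem_singleton_iff, hq, or_false]
      rw [pvGet2_set2_ne hne]
    · simp only [pvVs, Set.mem_setOf_eq, Set.mem_union, Set.mem_singleton_iff, hq, or_false]
      constructor
      · rintro ⟨a, b, _⟩; exact absurd ⟨a, b⟩ hqn
      · rintro ⟨a, b, _⟩; exact absurd ⟨a, b⟩ hqn

theorem pvGrid_ext {R C : Int} {g g' : List (List Int)} (hd : pvDims R C g) (hd' : pvDims R C g')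
    (h : ∀ p : Int × Int, pvInR R C p → pvGet2 g p.1 p.2 0 = pvGet2 g' p.1 p.2 0) : g = g' := by
  apply List.ext_getElem (by rw [hd.1, hd'.1])
  intro i h1 h2
  have hiR : i < R.toNat := by rw [← hd.1]; exact h1
  apply List.ext_getElem (by rw [hd.2 _ (List.getElem_mem h1), hd'.2 _ (List.getElem_mem h2)])
  intro j hj1 hj2
  have hjC : j < C.toNat := by rw [← hd.2 _ (List.getElem_mem h1)]; exact hj1
  have hin : pvInR R C ((i : Int), (j : Int)) := by
    refine ⟨by omega, by omega, by omega, by omega⟩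
  have := h _ hin
  unfold pvGet2 at this
  simp only [Int.toNat_natCast] at this
  rw [List.getD_eq_getElem _ _ h1, List.getD_eq_getElem _ _ hj1] at this
  rw [List.getD_eq_getElem _ _ h2, List.getD_eq_getElem _ _ hj2] at this
  exact this

theorem pvGet2_replicate {α : Type} {R C : Int} {p : Int × Int} (hin : pvInR R C p) (x d : α) :
    pvGet2 (List.replicate R.toNat (List.replicate C.toNat x)) p.1 p.2 d = x := by
  obtain ⟨h1, h2, h3, h4⟩ := hin
  unfold pvGet2
  have ha : p.1.toNat < (List.replicate R.toNat (List.replicate C.toNat x)).length := by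
    simp; omega
  rw [List.getD_eq_getElem _ _ ha, List.getElem_replicate]
  have hb : p.2.toNat < (List.replicate C.toNat x).length := by simp; omega
  rw [List.getD_eq_getElem _ _ hb, List.getElem_replicate]

theorem pvNcard_diff_lt {R C : Int} {S : Set (Int × Int)} {p : Int × Int}
    (hp : p ∈ pvGrid R C) (hpS : p ∉ S) :
    (pvGrid R C \ (S ∪ {p})).ncard < (pvGrid R C \ S).ncard := by
  have heq : pvGrid R C \ (S ∪ {p}) = (pvGrid R C \ S) \ {p} := by
    ext q; simp [Set.mem_diff]; tauto
  rw [heq]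
  exact Set.ncard_diff_singleton_lt_of_mem ⟨hp, hpS⟩ ((pvGrid_finite R C).diff)

theorem pvNcard_diff_le {R C : Int} {S T : Set (Int × Int)} (hST : S ⊆ T) :
    (pvGrid R C \ T).ncard ≤ (pvGrid R C \ S).ncard :=
  Set.ncard_le_ncard (Set.diff_subset_diff_right hST) ((pvGrid_finite R C).diff)
def pvDU (m : List (List Int)) (R C : Int) (S1 : Set (Int × Int)) (u : Int × Int) :
    List (Int × Int) → Set (Int × Int)
  | [] => ∅
  | d :: l =>
    {v | pvAdj m R C u (u.1 + d.1, u.2 + d.2) ∧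
         v ∈ pvReach (pvAdj m R C) (pvInR R C) S1 (u.1 + d.1, u.2 + d.2)} ∪
    pvDU m R C S1 u l

theorem pvDU_cons_pos {m : List (List Int)} {R C : Int} {S1 : Set (Int × Int)} {u d : Int × Int}
    {l : List (Int × Int)} (hadj : pvAdj m R C u (u.1 + d.1, u.2 + d.2)) :
    pvDU m R C S1 u (d :: l)
      = pvReach (pvAdj m R C) (pvInR R C) S1 (u.1 + d.1, u.2 + d.2) ∪ pvDU m R C S1 u l := by
  show {v | _ ∧ _} ∪ _ = _
  congr 1
  ext v
  simp [hadj]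

theorem pvDU_cons_neg {m : List (List Int)} {R C : Int} {S1 : Set (Int × Int)} {u d : Int × Int}
    {l : List (Int × Int)} (hadj : ¬ pvAdj m R C u (u.1 + d.1, u.2 + d.2)) :
    pvDU m R C S1 u (d :: l) = pvDU m R C S1 u l := by
  show {v | _ ∧ _} ∪ _ = _
  have : {v | pvAdj m R C u (u.1 + d.1, u.2 + d.2) ∧
      v ∈ pvReach (pvAdj m R C) (pvInR R C) S1 (u.1 + d.1, u.2 + d.2)} = (∅ : Set (Int × Int)) := by
    ext v; simp [hadj]
  rw [this, Set.empty_union]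

theorem pvDU_finite (m : List (List Int)) (R C : Int) (S1 : Set (Int × Int)) (u : Int × Int)
    (ds : List (Int × Int)) : (pvDU m R C S1 u ds).Finite := by
  induction ds with
  | nil => simp [pvDU]
  | cons d l ih =>
    refine Set.Finite.union ?_ ih
    apply Set.Finite.subset (pvReach_finite m R C S1 (u.1 + d.1, u.2 + d.2))
    intro x hx
    exact hx.2

theorem pvDU_avoid (m : List (List Int)) (R C : Int) (S1 : Set (Int × Int)) (u : Int × Int)
    (ds : List (Int × Int)) : ∀ x ∈ pvDU m R C S1 u ds, x ∉ S1 := by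
  induction ds with
  | nil => simp [pvDU]
  | cons d l ih =>
    rintro x (hx | hx)
    · exact pvReach_notmem hx.2
    · exact ih x hx

theorem pvDU_subset (m : List (List Int)) (R C : Int) {S : Set (Int × Int)} {u : Int × Int}
    (hg : pvInR R C u) (hu : u ∉ S) (ds : List (Int × Int)) :
    pvDU m R C (S ∪ {u}) u ds ⊆ pvReach (pvAdj m R C) (pvInR R C) S u := by
  induction ds with
  | nil => simp [pvDU]
  | cons d l ih =>
    rintro x (hx | hx)
    · obtain ⟨hadj, hx⟩ := hx
      have hn : (u.1 + d.1, u.2 + d.2) ∉ S ∪ {u} := hx.2.1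
      have hnu : (u.1 + d.1, u.2 + d.2) ≠ u := fun h => hn (Or.inr h)
      have hnS : (u.1 + d.1, u.2 + d.2) ∉ S := fun h => hn (Or.inl h)
      exact pvReach_decomp_sup hg hu hadj hnS hnu hx
    · exact ih hx

theorem pvDU_mem (m : List (List Int)) (R C : Int) (S1 : Set (Int × Int)) (u : Int × Int)
    {n : Int × Int} (ds : List (Int × Int))
    (hd : ∃ d ∈ ds, (u.1 + d.1, u.2 + d.2) = n) (hadj : pvAdj m R C u n) :
    pvReach (pvAdj m R C) (pvInR R C) S1 n ⊆ pvDU m R C S1 u ds := by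
  induction ds with
  | nil => simp at hd
  | cons d l ih =>
    rcases hd with ⟨d', hd', heq⟩
    rcases List.mem_cons.mp hd' with h | h
    · subst h
      intro x hx
      exact Or.inl ⟨heq ▸ hadj, heq ▸ hx⟩
    · exact fun x hx => Or.inr (ih ⟨d', h, heq⟩ hx)

theorem pvNbr_exists_dir {u n : Int × Int} (h : pvNbr u n) :
    ∃ d ∈ [((0 : Int), (-1 : Int)), (0, 1), (-1, 0), (1, 0)], (u.1 + d.1, u.2 + d.2) = n := by
  rcases h with ⟨h1, h2 | h2⟩ | ⟨h1, h2 | h2⟩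
  · refine ⟨(0, -1), by norm_num, ?_⟩
    rw [Prod.ext_iff]; constructor <;> simp <;> omega
  · refine ⟨(0, 1), by norm_num, ?_⟩
    rw [Prod.ext_iff]; constructor <;> simp <;> omega
  · refine ⟨(-1, 0), by norm_num, ?_⟩
    rw [Prod.ext_iff]; constructor <;> simp <;> omega
  · refine ⟨(1, 0), by norm_num, ?_⟩
    rw [Prod.ext_iff]; constructor <;> simp <;> omega

def pvDfsOk (m : List (List Int)) (R C : Int) (fuel : Nat) : Prop :=
  ∀ (w : List (List Bool)) (r c : Int), pvDims R C w →
    (pvGrid R C \ pvVs w).ncard < fuel →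
    pvDims R C (pvDfs m R C fuel r c w).2 ∧
    pvVs (pvDfs m R C fuel r c w).2
      = pvVs w ∪ pvReach (pvAdj m R C) (pvInR R C) (pvVs w) (r, c) ∧
    (pvDfs m R C fuel r c w).1
      = ((pvReach (pvAdj m R C) (pvInR R C) (pvVs w) (r, c)).ncard : Int)

theorem pvDfs_fold (m : List (List Int)) (R C : Int) (fuel : Nat)
    (hIH : pvDfsOk m R C fuel)
    (u : Int × Int) (hu : pvInR R C u) (S1 : Set (Int × Int))
    (hfuel : (pvGrid R C \ S1).ncard < fuel) :
    ∀ (ds : List (Int × Int)) (w : List (List Bool)) (D : Set (Int × Int)) (c0 : Int),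
      pvDims R C w → pvVs w = S1 ∪ D → pvSat (pvAdj m R C) S1 D → D.Finite →
      (∀ d ∈ ds, pvNbr u (u.1 + d.1, u.2 + d.2)) →
      pvDims R C (ds.foldl (fun (st : Int × List (List Bool)) d =>
          let nr := u.1 + d.1
          let nc := u.2 + d.2
          if 0 ≤ nr ∧ nr < R ∧ 0 ≤ nc ∧ nc < C ∧ pvGet2 st.2 nr nc true = false ∧
              pvMget m nr nc = pvMget m u.1 u.2 then
            let rec_ := pvDfs m R C fuel nr nc st.2
            (st.1 + rec_.1, rec_.2)
          else st) (c0 + (D.ncard : Int), w)).2 ∧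
      pvVs (ds.foldl (fun (st : Int × List (List Bool)) d =>
          let nr := u.1 + d.1
          let nc := u.2 + d.2
          if 0 ≤ nr ∧ nr < R ∧ 0 ≤ nc ∧ nc < C ∧ pvGet2 st.2 nr nc true = false ∧
              pvMget m nr nc = pvMget m u.1 u.2 then
            let rec_ := pvDfs m R C fuel nr nc st.2
            (st.1 + rec_.1, rec_.2)
          else st) (c0 + (D.ncard : Int), w)).2
        = S1 ∪ (D ∪ pvDU m R C S1 u ds) ∧
      (ds.foldl (fun (st : Int × List (List Bool)) d =>
          let nr := u.1 + d.1
          let nc := u.2 + d.2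
          if 0 ≤ nr ∧ nr < R ∧ 0 ≤ nc ∧ nc < C ∧ pvGet2 st.2 nr nc true = false ∧
              pvMget m nr nc = pvMget m u.1 u.2 then
            let rec_ := pvDfs m R C fuel nr nc st.2
            (st.1 + rec_.1, rec_.2)
          else st) (c0 + (D.ncard : Int), w)).1
        = c0 + (((D ∪ pvDU m R C S1 u ds)).ncard : Int) := by
  intro ds
  induction ds with
  | nil =>
    intro w D c0 hdims hVs hSat hDfin _
    have hDU : pvDU m R C S1 u [] = ∅ := rfl
    simp only [List.foldl_nil, hDU, Set.union_empty]
    exact ⟨hdims, by rw [hVs], by trivial⟩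
  | cons d l ih =>
    intro w D c0 hdims hVs hSat hDfin hnbrs
    have hsymm := pvAdj_symm' m R C
    have hgood := pvAdj_good m R C
    have hnbr : pvNbr u (u.1 + d.1, u.2 + d.2) := hnbrs d (List.mem_cons_self)
    set n : Int × Int := (u.1 + d.1, u.2 + d.2) with hn
    simp only [List.foldl_cons]
    by_cases hInR : pvInR R C n
    · by_cases hval : pvMget m n.1 n.2 = pvMget m u.1 u.2
      · have hadj : pvAdj m R C u n := ⟨hu, hInR, hval, hnbr⟩
        by_cases hmem : n ∈ S1 ∪ D
        · -- already visited: skip this direction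
          have hget : pvGet2 w n.1 n.2 true = true := (mem_pvVs hdims hInR).mp (hVs ▸ hmem)
          have hcond : ¬ (0 ≤ u.1 + d.1 ∧ u.1 + d.1 < R ∧ 0 ≤ u.2 + d.2 ∧ u.2 + d.2 < C ∧
              pvGet2 w (u.1 + d.1) (u.2 + d.2) true = false ∧
              pvMget m (u.1 + d.1) (u.2 + d.2) = pvMget m u.1 u.2) := by
            intro hc
            have : pvGet2 w n.1 n.2 true = false := hc.2.2.2.2.1
            rw [hget] at this
            exact (by simp at this)
          rw [if_neg hcond]
          have habsorb : D ∪ pvDU m R C S1 u (d :: l) = D ∪ pvDU m R C S1 u l := by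
            rw [pvDU_cons_pos hadj, ← Set.union_assoc]
            congr 1
            rcases hmem with hmem | hmem
            · rw [pvReach_empty_of_mem hmem, Set.union_empty]
            · exact Set.union_eq_self_of_subset_right (pvSat_absorb hSat hmem)
          rw [habsorb]
          exact ih w D c0 hdims hVs hSat hDfin (fun d' hd' => hnbrs d' (List.mem_cons_of_mem d hd'))
        · -- fresh neighbour: recursive dfs call
          have hnS1 : n ∉ S1 := fun h => hmem (Or.inl h)
          have hnD : n ∉ D := fun h => hmem (Or.inr h)
          have hget : pvGet2 w n.1 n.2 true = false := by
            rw [← notmem_pvVs hdims hInR, hVs]; exact hmem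
          have hcond : (0 ≤ u.1 + d.1 ∧ u.1 + d.1 < R ∧ 0 ≤ u.2 + d.2 ∧ u.2 + d.2 < C ∧
              pvGet2 w (u.1 + d.1) (u.2 + d.2) true = false ∧
              pvMget m (u.1 + d.1) (u.2 + d.2) = pvMget m u.1 u.2) :=
            ⟨hInR.1, hInR.2.1, hInR.2.2.1, hInR.2.2.2, hget, hval⟩
          rw [if_pos hcond]
          have hfuel' : (pvGrid R C \ pvVs w).ncard < fuel := by
            calc (pvGrid R C \ pvVs w).ncard ≤ (pvGrid R C \ S1).ncard := by
                  rw [hVs]; exact pvNcard_diff_le Set.subset_union_left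
              _ < fuel := hfuel
          obtain ⟨hdims', hVs', hcnt'⟩ := hIH w n.1 n.2 hdims hfuel'
          have hpair : ((n.1 : Int), (n.2 : Int)) = n := rfl
          rw [hpair] at hVs' hcnt'
          have hRew : pvReach (pvAdj m R C) (pvInR R C) (pvVs w) n
              = pvReach (pvAdj m R C) (pvInR R C) S1 n := by
            rw [hVs]
            exact pvReach_avoid_union hsymm hgood hSat hnD
          rw [hRew] at hVs' hcnt'
          have hfinR := pvReach_finite m R C S1 n
          have hdisj : Disjoint D (pvReach (pvAdj m R C) (pvInR R C) S1 n) :=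
            Set.disjoint_right.mpr (fun x hx => pvReach_disj_sat hsymm hgood hSat hnD hx)
          have hcard2 : ((D ∪ pvReach (pvAdj m R C) (pvInR R C) S1 n).ncard : Int)
              = (D.ncard : Int) + ((pvReach (pvAdj m R C) (pvInR R C) S1 n).ncard : Int) := by
            rw [Set.ncard_union_eq hdisj hDfin hfinR]; push_cast; ring
          have hVs2 : pvVs (pvDfs m R C fuel n.1 n.2 w).2
              = S1 ∪ (D ∪ pvReach (pvAdj m R C) (pvInR R C) S1 n) := by
            rw [hVs', hVs, Set.union_assoc]
          have hstep := ih (pvDfs m R C fuel n.1 n.2 w).2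
            (D ∪ pvReach (pvAdj m R C) (pvInR R C) S1 n) c0 hdims' hVs2
            (pvSat_union hSat (pvSat_reach _ _ _ _))
            (hDfin.union hfinR)
            (fun d' hd' => hnbrs d' (List.mem_cons_of_mem d hd'))
          have hinit : c0 + (D.ncard : Int) + (pvDfs m R C fuel n.1 n.2 w).1
              = c0 + (((D ∪ pvReach (pvAdj m R C) (pvInR R C) S1 n)).ncard : Int) := by
            rw [hcnt', hcard2]; ring
          rw [hinit] at *
          refine ⟨hstep.1, ?_, ?_⟩
          · rw [hstep.2.1, pvDU_cons_pos hadj, ← Set.union_assoc D]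
          · rw [hstep.2.2, pvDU_cons_pos hadj, ← Set.union_assoc D]
      · -- value mismatch: skip, and the pvDU piece is empty
        have hcond : ¬ (0 ≤ u.1 + d.1 ∧ u.1 + d.1 < R ∧ 0 ≤ u.2 + d.2 ∧ u.2 + d.2 < C ∧
            pvGet2 w (u.1 + d.1) (u.2 + d.2) true = false ∧
            pvMget m (u.1 + d.1) (u.2 + d.2) = pvMget m u.1 u.2) := by
          intro hc; exact hval hc.2.2.2.2.2
        rw [if_neg hcond]
        have hnadj : ¬ pvAdj m R C u n := fun h => hval h.2.2.1
        rw [pvDU_cons_neg hnadj]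
        exact ih w D c0 hdims hVs hSat hDfin (fun d' hd' => hnbrs d' (List.mem_cons_of_mem d hd'))
    · -- out of range: skip, empty piece
      have hcond : ¬ (0 ≤ u.1 + d.1 ∧ u.1 + d.1 < R ∧ 0 ≤ u.2 + d.2 ∧ u.2 + d.2 < C ∧
          pvGet2 w (u.1 + d.1) (u.2 + d.2) true = false ∧
          pvMget m (u.1 + d.1) (u.2 + d.2) = pvMget m u.1 u.2) := by
        intro hc; exact hInR ⟨hc.1, hc.2.1, hc.2.2.1, hc.2.2.2.1⟩
      rw [if_neg hcond]
      have hnadj : ¬ pvAdj m R C u n := fun h => hInR h.2.1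
      rw [pvDU_cons_neg hnadj]
      exact ih w D c0 hdims hVs hSat hDfin (fun d' hd' => hnbrs d' (List.mem_cons_of_mem d hd'))

theorem pvDfs_ok (m : List (List Int)) (R C : Int) : ∀ fuel, pvDfsOk m R C fuel := by
  intro fuel
  induction fuel with
  | zero => intro w r c _ hf; exact absurd hf (Nat.not_lt_zero _)
  | succ fuel ih =>
    intro w r c hdims hfuel
    have hsymm := pvAdj_symm' m R C
    have hgood := pvAdj_good m R C
    by_cases hout : r < 0 ∨ c < 0 ∨ R ≤ r ∨ C ≤ c
    · have h1 : pvDfs m R C (fuel + 1) r c w = (0, w) := by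
        simp only [pvDfs]
        rw [if_pos hout]
      have hnin : ¬ pvInR R C (r, c) := by
        intro hin
        obtain ⟨a, b, c', d⟩ := hin
        simp only at a b c' d
        rcases hout with h | h | h | h <;> omega
      rw [h1, pvReach_empty_of_not_good hnin]
      exact ⟨hdims, by simp, by simp⟩
    · have hin : pvInR R C (r, c) := by
        refine ⟨?_, ?_, ?_, ?_⟩ <;> simp only [] <;> omega
      by_cases hvis : pvGet2 w r c true = true
      · have h1 : pvDfs m R C (fuel + 1) r c w = (0, w) := by
          simp only [pvDfs]
          rw [if_neg hout, if_pos hvis]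
        have hmem : (r, c) ∈ pvVs w := (mem_pvVs hdims hin).mpr hvis
        rw [h1, pvReach_empty_of_mem hmem]
        exact ⟨hdims, by simp, by simp⟩
      · have hget : pvGet2 w r c true = false := by
          cases h : pvGet2 w r c true
          · rfl
          · exact absurd h hvis
        have hnotmem : (r, c) ∉ pvVs w := (notmem_pvVs hdims hin).mpr hget
        have h1 : pvDfs m R C (fuel + 1) r c w =
            [((0 : Int), (-1 : Int)), (0, 1), (-1, 0), (1, 0)].foldl
              (fun (st : Int × List (List Bool)) d =>
                let nr := r + d.1
                let nc := c + d.2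
                if 0 ≤ nr ∧ nr < R ∧ 0 ≤ nc ∧ nc < C ∧
                    pvGet2 st.2 nr nc true = false ∧
                    pvMget m nr nc = pvMget m r c then
                  let rec_ := pvDfs m R C fuel nr nc st.2
                  (st.1 + rec_.1, rec_.2)
                else st)
              (1, pvSet2 w r c true) := by
          simp only [pvDfs]
          rw [if_neg hout, if_neg hvis]
        set S : Set (Int × Int) := pvVs w with hS
        set S1 : Set (Int × Int) := S ∪ {(r, c)} with hS1
        have hdims1 : pvDims R C (pvSet2 w r c true) := pvDims_set2 hdims r c true
        have hVs1 : pvVs (pvSet2 w r c true) = S1 := pvVs_set2_true hdims hin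
        have hfuel1 : (pvGrid R C \ S1).ncard < fuel := by
          have h2 := pvNcard_diff_lt (S := S) hin hnotmem
          rw [← hS1] at h2
          omega
        have hnbrs : ∀ d ∈ [((0 : Int), (-1 : Int)), (0, 1), (-1, 0), (1, 0)],
            pvNbr (r, c) (((r, c) : Int × Int).1 + d.1, ((r, c) : Int × Int).2 + d.2) := by
          intro d hd
          fin_cases hd
          · exact Or.inl ⟨by simp, Or.inl (by simp; ring)⟩
          · exact Or.inl ⟨by simp, Or.inr (by simp)⟩
          · exact Or.inr ⟨by simp, Or.inl (by simp; ring)⟩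
          · exact Or.inr ⟨by simp, Or.inr (by simp)⟩
        have hVs1' : pvVs (pvSet2 w r c true) = S1 ∪ (∅ : Set (Int × Int)) := by
          rw [hVs1, Set.union_empty]
        have hSat0 : pvSat (pvAdj m R C) S1 (∅ : Set (Int × Int)) := by
          intro y hy; exact absurd hy (Set.notMem_empty y)
        obtain ⟨f1, f2, f3⟩ := pvDfs_fold m R C fuel ih (r, c) hin S1 hfuel1
          [((0 : Int), (-1 : Int)), (0, 1), (-1, 0), (1, 0)]
          (pvSet2 w r c true) (∅ : Set (Int × Int)) 1 hdims1 hVs1' hSat0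
          Set.finite_empty hnbrs
        have hinit : (1 : Int) + (((∅ : Set (Int × Int))).ncard : Int) = 1 := by simp
        rw [hinit] at f1 f2 f3
        rw [Set.empty_union] at f2 f3
        set DU := pvDU m R C S1 (r, c)
          [((0 : Int), (-1 : Int)), (0, 1), (-1, 0), (1, 0)] with hDU
        have huDU : (r, c) ∉ DU := by
          intro h
          exact pvDU_avoid m R C S1 (r, c) _ _ h (Or.inr rfl)
        have hReach : pvReach (pvAdj m R C) (pvInR R C) S (r, c) = insert (r, c) DU := by
          rw [Set.insert_eq]
          apply Set.Subset.antisymm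
          · intro v hv
            rcases pvReach_decomp_mem hv hgood with heq | ⟨n, hadj, hnS, hnu, hvR⟩
            · exact Or.inl heq
            · exact Or.inr (pvDU_mem m R C S1 (r, c) _
                (pvNbr_exists_dir hadj.2.2.2) hadj hvR)
          · rintro v (hv | hv)
            · rw [Set.mem_singleton_iff] at hv
              rw [hv]
              exact pvReach_self hin hnotmem
            · exact pvDU_subset m R C hin hnotmem _ hv
        have hfinDU : DU.Finite := pvDU_finite m R C S1 (r, c) _
        have hcard : (pvReach (pvAdj m R C) (pvInR R C) S (r, c)).ncard = DU.ncard + 1 := by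
          rw [hReach, Set.ncard_insert_of_notMem huDU hfinDU]
        refine ⟨by rw [h1]; exact f1, ?_, ?_⟩
        · rw [h1, f2, hReach, Set.insert_eq, ← Set.union_assoc]
        · rw [h1, f3, hcard]
          push_cast
          ring

theorem pvRange_foldl_inv {σ : Type} (Q : Nat → σ → Prop) (k : Nat) (g : σ → Nat → σ)
    (init : σ) (hinit : Q 0 init) (hstep : ∀ j st, j < k → Q j st → Q (j + 1) (g st j)) :
    Q k ((List.range k).foldl g init) := by
  induction k with
  | zero => simpa using hinit
  | succ k ih =>
    rw [List.range_succ, List.foldl_append]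
    exact hstep k _ (Nat.lt_succ_self k)
      (ih (fun j st hj hQ => hstep j st (Nat.lt_succ_of_lt hj) hQ))

theorem pvPyRange_foldl {σ : Type} (n : Int) (g : σ → Int → σ) (init : σ) :
    (PySem.List.pyRange 0 n 1).foldl g init
      = (List.range n.toNat).foldl (fun st (j : Nat) => g st (j : Int)) init := by
  rw [PySem.List.pyRange_one, List.foldl_map]
  have h0 : n - 0 = n := by ring
  rw [h0]
  simp only [zero_add]

theorem pvLoop1_inv {σ : Type} (Q : Nat → σ → Prop) (n : Int) (g : σ → Int → σ) (init : σ)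
    (hinit : Q 0 init) (hstep : ∀ j st, j < n.toNat → Q j st → Q (j + 1) (g st (j : Int))) :
    Q n.toNat ((PySem.List.pyRange 0 n 1).foldl g init) := by
  rw [pvPyRange_foldl]
  exact pvRange_foldl_inv Q n.toNat _ init hinit hstep

theorem pvLoop2_inv {σ : Type} (P : Nat → Nat → σ → Prop) (R C : Int)
    (body : σ → Int → Int → σ) (init : σ)
    (hinit : P 0 0 init)
    (hstep : ∀ i j st, i < R.toNat → j < C.toNat → P i j st → P i (j + 1) (body st (i : Int) (j : Int)))
    (hrow : ∀ i st, i < R.toNat → P i C.toNat st → P (i + 1) 0 st) :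
    P R.toNat 0 ((PySem.List.pyRange 0 R 1).foldl
      (fun st i => (PySem.List.pyRange 0 C 1).foldl (fun st j => body st i j) st) init) := by
  apply pvLoop1_inv (fun i st => P i 0 st) R _ init hinit
  intro i st hi hP
  exact hrow i _ hi (pvLoop1_inv (fun j st => P i j st) C _ st hP
    (fun j st' hj hQ => hstep i j st' hi hj hQ))

noncomputable def pvF (m : List (List Int)) (R C : Int) (p : Int × Int) : Int :=
  ((pvReach (pvAdj m R C) (pvInR R C) (∅ : Set (Int × Int)) p).ncard : Int) - 1

theorem pvGet2_set2_self' {α : Type} {R C : Int} {g : List (List α)} (hd : pvDims R C g)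
    {p : Int × Int} (hin : pvInR R C p) (x d : α) :
    pvGet2 (pvSet2 g p.1 p.2 x) p.1 p.2 d = x := by
  obtain ⟨h1, h2, h3, h4⟩ := hin
  have hr : p.1.toNat < g.length := by rw [hd.1]; omega
  have hc : p.2.toNat < (g.getD p.1.toNat []).length := by
    rw [List.getD_eq_getElem _ _ hr, hd.2 _ (List.getElem_mem hr)]; omega
  exact pvGet2_set2_self hr hc x d

theorem pvGet2_set2_ne' {α : Type} {R C : Int} {g : List (List α)}
    {p q : Int × Int} (hp : pvInR R C p) (hq : pvInR R C q) (hne : q ≠ p) (x d : α) :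
    pvGet2 (pvSet2 g p.1 p.2 x) q.1 q.2 d = pvGet2 g q.1 q.2 d := by
  apply pvGet2_set2_ne
  obtain ⟨a1, a2, a3, a4⟩ := hp
  obtain ⟨b1, b2, b3, b4⟩ := hq
  rcases Prod.ext_iff.not.mp hne with h
  by_contra hcon
  push_neg at hcon
  exact hne (Prod.ext_iff.mpr ⟨by omega, by omega⟩)

-- A's main loop: after the row-major double loop, every in-range cell holds pvF
theorem pvA_loop (m : List (List Int)) (R C : Int) (hR : 0 ≤ R) (hC : 0 ≤ C) :
    pvDims R C ((PySem.List.pyRange 0 R 1).foldl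
      (fun fc i =>
        (PySem.List.pyRange 0 C 1).foldl
          (fun fc j =>
            if pvGet2 fc i j 0 = 0 then
              let visited := List.replicate R.toNat (List.replicate C.toNat false)
              pvSet2 fc i j ((pvDfs m R C (R.toNat * C.toNat + 1) i j visited).1 - 1)
            else fc)
          fc)
      (List.replicate R.toNat (List.replicate C.toNat (0 : Int)))) ∧
    ∀ p : Int × Int, pvInR R C p →
      pvGet2 ((PySem.List.pyRange 0 R 1).foldl
        (fun fc i =>
          (PySem.List.pyRange 0 C 1).foldl
            (fun fc j =>
              if pvGet2 fc i j 0 = 0 then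
                let visited := List.replicate R.toNat (List.replicate C.toNat false)
                pvSet2 fc i j ((pvDfs m R C (R.toNat * C.toNat + 1) i j visited).1 - 1)
              else fc)
            fc)
        (List.replicate R.toNat (List.replicate C.toNat (0 : Int)))) p.1 p.2 0 = pvF m R C p := by
  have hmain := pvLoop2_inv
    (fun i j fc => pvDims R C fc ∧
      ∀ p : Int × Int, pvInR R C p →
        pvGet2 fc p.1 p.2 0
          = (if p.1 < (i : Int) ∨ (p.1 = (i : Int) ∧ p.2 < (j : Int)) then pvF m R C p else 0))
    R C
    (fun fc i j =>
      if pvGet2 fc i j 0 = 0 then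
        let visited := List.replicate R.toNat (List.replicate C.toNat false)
        pvSet2 fc i j ((pvDfs m R C (R.toNat * C.toNat + 1) i j visited).1 - 1)
      else fc)
    (List.replicate R.toNat (List.replicate C.toNat (0 : Int)))
    ?_ ?_ ?_
  · exact ⟨hmain.1, fun p hp => by
      rw [hmain.2 p hp]
      exact if_pos (Or.inl (by obtain ⟨a, b, _, _⟩ := hp; omega))⟩
  · refine ⟨pvDims_replicate R C 0, fun p hp => ?_⟩
    rw [pvGet2_replicate hp]
    have : ¬ (p.1 < ((0 : Nat) : Int) ∨ (p.1 = ((0 : Nat) : Int) ∧ p.2 < ((0 : Nat) : Int))) := by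
      obtain ⟨a, b, c, d⟩ := hp
      simp only [Int.natCast_zero]
      omega
    rw [if_neg this]
  · intro i j fc hi hj hP
    dsimp only
    obtain ⟨hdims, hvals⟩ := hP
    have hu : pvInR R C ((i : Int), (j : Int)) := ⟨by omega, by omega, by omega, by omega⟩
    have hcur : pvGet2 fc (i : Int) (j : Int) 0 = 0 := by
      have := hvals _ hu
      simp only at this
      rw [this, if_neg (by omega)]
    rw [if_pos hcur]
    have hdimsV := pvDims_replicate R C false
    have hVs0 : pvVs (List.replicate R.toNat (List.replicate C.toNat false)) = ∅ :=
      pvVs_replicate R.toNat C.toNat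
    have hfuel : (pvGrid R C \ pvVs (List.replicate R.toNat (List.replicate C.toNat false))).ncard
        < R.toNat * C.toNat + 1 := by
      rw [hVs0, Set.diff_empty, pvGrid_ncard hR hC]
      omega
    obtain ⟨_, _, hcnt⟩ := pvDfs_ok m R C (R.toNat * C.toNat + 1)
      (List.replicate R.toNat (List.replicate C.toNat false)) (i : Int) (j : Int) hdimsV hfuel
    rw [hVs0] at hcnt
    refine ⟨pvDims_set2 hdims _ _ _, fun p hp => ?_⟩
    by_cases hpu : p = ((i : Int), (j : Int))
    · rw [hpu, pvGet2_set2_self' hdims hu, hcnt]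
      have hcond2 : (((i : Int), (j : Int)) : Int × Int).1 < (i : Int) ∨
          ((((i : Int), (j : Int)) : Int × Int).1 = (i : Int) ∧
           (((i : Int), (j : Int)) : Int × Int).2 < (((j + 1 : Nat)) : Int)) := by
        right
        refine ⟨rfl, ?_⟩
        push_cast
        omega
      rw [if_pos hcond2]
      rfl
    · rw [pvGet2_set2_ne' hu hp hpu, hvals p hp]
      have hcond : (p.1 < (i : Int) ∨ (p.1 = (i : Int) ∧ p.2 < (j : Int)))
          ↔ (p.1 < (i : Int) ∨ (p.1 = (i : Int) ∧ p.2 < ((j + 1 : Nat) : Int))) := by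
        have hne : p.1 ≠ (i : Int) ∨ p.2 ≠ (j : Int) := by
          by_contra hcon
          push_neg at hcon
          exact hpu (Prod.ext_iff.mpr ⟨hcon.1, hcon.2⟩)
        push_cast
        rcases hne with h | h <;> constructor <;> intro hh <;> omega
      split_ifs with h1 h2 h2
      · rfl
      · exact absurd (hcond.mp h1) h2
      · exact absurd (hcond.mpr h2) h1
      · rfl
  · intro i fc hi hP
    obtain ⟨hdims, hvals⟩ := hP
    refine ⟨hdims, fun p hp => ?_⟩
    rw [hvals p hp]
    obtain ⟨a, b, c, d⟩ := hp
    have hcond : (p.1 < (i : Int) ∨ (p.1 = (i : Int) ∧ p.2 < ((C.toNat : Nat) : Int)))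
        ↔ (p.1 < ((i + 1 : Nat) : Int) ∨ (p.1 = ((i + 1 : Nat) : Int) ∧ p.2 < ((0 : Nat) : Int))) := by
      push_cast
      constructor <;> intro hh <;> omega
    split_ifs with h1 h2 h2
    · rfl
    · exact absurd (hcond.mp h1) h2
    · exact absurd (hcond.mpr h2) h1
    · rfl
theorem pvList_ncard {l : List (Int × Int)} (h : l.Nodup) :
    ({x | x ∈ l} : Set (Int × Int)).ncard = l.length := by
  have he : ({x | x ∈ l} : Set (Int × Int)) = ↑l.toFinset := by ext x; simp
  rw [he, Set.ncard_coe_finset, List.toFinset_card_of_nodup h]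

theorem pvFlood_fold (m : List (List Int)) (R C : Int) {p1 p2 : Int} (hp : pvInR R C (p1, p2)) :
    ∀ (ns : List (Int × Int)) (seen : List (List Bool)) (stk : List (Int × Int)),
      pvDims R C seen → (∀ n ∈ ns, pvNbr (p1, p2) n) →
      ∃ new : List (Int × Int),
        (ns.foldl (fun (st : List (List Bool) × List (Int × Int)) nb =>
            if 0 ≤ nb.1 ∧ nb.1 < R ∧ 0 ≤ nb.2 ∧ nb.2 < C ∧
                pvGet2 st.1 nb.1 nb.2 true = false ∧
                pvMget m nb.1 nb.2 = pvMget m p1 p2 then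
              (pvSet2 st.1 nb.1 nb.2 true, nb :: st.2)
            else st) (seen, stk)).2 = new.reverse ++ stk ∧
        pvDims R C (ns.foldl (fun (st : List (List Bool) × List (Int × Int)) nb =>
            if 0 ≤ nb.1 ∧ nb.1 < R ∧ 0 ≤ nb.2 ∧ nb.2 < C ∧
                pvGet2 st.1 nb.1 nb.2 true = false ∧
                pvMget m nb.1 nb.2 = pvMget m p1 p2 then
              (pvSet2 st.1 nb.1 nb.2 true, nb :: st.2)
            else st) (seen, stk)).1 ∧
        pvVs (ns.foldl (fun (st : List (List Bool) × List (Int × Int)) nb =>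
            if 0 ≤ nb.1 ∧ nb.1 < R ∧ 0 ≤ nb.2 ∧ nb.2 < C ∧
                pvGet2 st.1 nb.1 nb.2 true = false ∧
                pvMget m nb.1 nb.2 = pvMget m p1 p2 then
              (pvSet2 st.1 nb.1 nb.2 true, nb :: st.2)
            else st) (seen, stk)).1 = pvVs seen ∪ {x | x ∈ new} ∧
        new.Nodup ∧
        (∀ x ∈ new, pvAdj m R C (p1, p2) x ∧ x ∉ pvVs seen) ∧
        (∀ n ∈ ns, pvAdj m R C (p1, p2) n →
          n ∈ pvVs (ns.foldl (fun (st : List (List Bool) × List (Int × Int)) nb =>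
            if 0 ≤ nb.1 ∧ nb.1 < R ∧ 0 ≤ nb.2 ∧ nb.2 < C ∧
                pvGet2 st.1 nb.1 nb.2 true = false ∧
                pvMget m nb.1 nb.2 = pvMget m p1 p2 then
              (pvSet2 st.1 nb.1 nb.2 true, nb :: st.2)
            else st) (seen, stk)).1) := by
  intro ns
  induction ns with
  | nil =>
    intro seen stk hdims _
    refine ⟨[], by simp, hdims, by simp, List.nodup_nil, by simp, by simp⟩
  | cons n ns' ih =>
    intro seen stk hdims hns
    have hnbr : pvNbr (p1, p2) n := hns n List.mem_cons_self
    simp only [List.foldl_cons]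
    by_cases hcond : 0 ≤ n.1 ∧ n.1 < R ∧ 0 ≤ n.2 ∧ n.2 < C ∧
        pvGet2 seen n.1 n.2 true = false ∧ pvMget m n.1 n.2 = pvMget m p1 p2
    · rw [if_pos hcond]
      have hInRn : pvInR R C n := ⟨hcond.1, hcond.2.1, hcond.2.2.1, hcond.2.2.2.1⟩
      have hfresh : n ∉ pvVs seen := (notmem_pvVs hdims hInRn).mpr hcond.2.2.2.2.1
      have hadjn : pvAdj m R C (p1, p2) n := ⟨hp, hInRn, hcond.2.2.2.2.2, hnbr⟩
      have hdims1 : pvDims R C (pvSet2 seen n.1 n.2 true) := pvDims_set2 hdims _ _ _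
      have hVs1 : pvVs (pvSet2 seen n.1 n.2 true) = pvVs seen ∪ {n} :=
        pvVs_set2_true hdims hInRn
      obtain ⟨new', e1, e2, e3, e4, e5, e6⟩ :=
        ih (pvSet2 seen n.1 n.2 true) (n :: stk) hdims1
          (fun n' hn' => hns n' (List.mem_cons_of_mem n hn'))
      refine ⟨n :: new', ?_, e2, ?_, ?_, ?_, ?_⟩
      · rw [e1, List.reverse_cons, List.append_assoc]
        rfl
      · rw [e3, hVs1, Set.union_assoc]
        congr 1
        ext x
        simp [or_comm]
      · refine List.Nodup.cons ?_ e4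
        intro hmem
        exact (e5 n hmem).2 (hVs1 ▸ Or.inr rfl)
      · intro x hx
        rcases List.mem_cons.mp hx with h | h
        · subst h
          exact ⟨hadjn, hfresh⟩
        · have := e5 x h
          exact ⟨this.1, fun hxc => this.2 (hVs1 ▸ Or.inl hxc)⟩
      · intro n' hn' hadj'
        rcases List.mem_cons.mp hn' with h | h
        · subst h
          rw [e3]
          exact Or.inl (hVs1 ▸ Or.inr rfl)
        · exact e6 n' h hadj'
    · rw [if_neg hcond]
      obtain ⟨new', e1, e2, e3, e4, e5, e6⟩ :=
        ih seen stk hdims (fun n' hn' => hns n' (List.mem_cons_of_mem n hn'))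
      refine ⟨new', e1, e2, e3, e4, e5, ?_⟩
      intro n' hn' hadj'
      rcases List.mem_cons.mp hn' with h | h
      · subst h
        have hget : pvGet2 seen n'.1 n'.2 true = true := by
          by_contra hg
          have hg' : pvGet2 seen n'.1 n'.2 true = false := by
            cases hgg : pvGet2 seen n'.1 n'.2 true
            · rfl
            · exact absurd hgg hg
          exact hcond ⟨hadj'.2.1.1, hadj'.2.1.2.1, hadj'.2.1.2.2.1, hadj'.2.1.2.2.2,
            hg', hadj'.2.2.1⟩
        have : n' ∈ pvVs seen := (mem_pvVs hdims hadj'.2.1).mpr hget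
        rw [e3]
        exact Or.inl this
      · exact e6 n' h hadj'

theorem pvFlood_ok (m : List (List Int)) (R C : Int) (K : Set (Int × Int)) (u0 : Int × Int) :
    ∀ (fuel : Nat) (stack : List (Int × Int)) (seen : List (List Bool)) (comp : List (Int × Int)),
      pvDims R C seen →
      pvVs seen = K ∪ {x | x ∈ comp ++ stack} →
      (comp ++ stack).Nodup →
      (∀ x ∈ comp ++ stack, x ∈ pvReach (pvAdj m R C) (pvInR R C) K u0) →
      (∀ y ∈ comp, ∀ w, pvAdj m R C y w → w ∈ pvVs seen) →
      u0 ∈ comp ++ stack →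
      2 * (pvGrid R C \ pvVs seen).ncard + stack.length < fuel →
      pvDims R C (pvFlood m R C fuel stack seen comp).1 ∧
      pvVs (pvFlood m R C fuel stack seen comp).1
        = K ∪ pvReach (pvAdj m R C) (pvInR R C) K u0 ∧
      (pvFlood m R C fuel stack seen comp).2.Nodup ∧
      {x | x ∈ (pvFlood m R C fuel stack seen comp).2}
        = pvReach (pvAdj m R C) (pvInR R C) K u0 := by
  intro fuel
  induction fuel with
  | zero => intro stack seen comp _ _ _ _ _ _ hf; omega
  | succ fuel ihf =>
    intro stack seen comp hdims hVs hnodup hreach hfront hu0 hfuel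
    have hsymm := pvAdj_symm' m R C
    have hgood := pvAdj_good m R C
    cases stack with
    | nil =>
      have hflood : pvFlood m R C (fuel + 1) [] seen comp = (seen, comp) := rfl
      rw [hflood]
      rw [List.append_nil] at hVs hnodup hreach hu0
      have hSat : pvSat (pvAdj m R C) K {x | x ∈ comp} := by
        intro y hy w hadj hwK
        have := hfront y hy w hadj
        rw [hVs] at this
        rcases this with h | h
        · exact absurd h hwK
        · exact h
      have hMT : ({x | x ∈ comp} : Set (Int × Int))
          = pvReach (pvAdj m R C) (pvInR R C) K u0 := by
        apply Set.Subset.antisymm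
        · exact fun x hx => hreach x hx
        · exact pvSat_absorb hSat hu0
      exact ⟨hdims, by rw [hVs, hMT], hnodup, hMT⟩
    | cons pq rest =>
      obtain ⟨r, c⟩ := pq
      have hpR : (r, c) ∈ pvReach (pvAdj m R C) (pvInR R C) K u0 :=
        hreach (r, c) (by simp)
      have hpIn : pvInR R C (r, c) := pvReach_good hgood hpR
      have hpK : (r, c) ∉ K := pvReach_notmem hpR
      have hns : ∀ n ∈ [(r, c - 1), (r, c + 1), (r - 1, c), (r + 1, c)], pvNbr (r, c) n := by
        intro n hn
        fin_cases hn
        · exact Or.inl ⟨rfl, Or.inl rfl⟩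
        · exact Or.inl ⟨rfl, Or.inr rfl⟩
        · exact Or.inr ⟨rfl, Or.inl rfl⟩
        · exact Or.inr ⟨rfl, Or.inr rfl⟩
      obtain ⟨new, e1, e2, e3, e4, e5, e6⟩ :=
        pvFlood_fold m R C hpIn [(r, c - 1), (r, c + 1), (r - 1, c), (r + 1, c)] seen rest
          hdims hns
      set st := [(r, c - 1), (r, c + 1), (r - 1, c), (r + 1, c)].foldl
          (fun (st : List (List Bool) × List (Int × Int)) nb =>
            if 0 ≤ nb.1 ∧ nb.1 < R ∧ 0 ≤ nb.2 ∧ nb.2 < C ∧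
                pvGet2 st.1 nb.1 nb.2 true = false ∧
                pvMget m nb.1 nb.2 = pvMget m r c then
              (pvSet2 st.1 nb.1 nb.2 true, nb :: st.2)
            else st) (seen, rest) with hst
      have hflood : pvFlood m R C (fuel + 1) ((r, c) :: rest) seen comp
          = pvFlood m R C fuel st.2 st.1 (comp ++ [(r, c)]) := rfl
      rw [hflood, e1]
      -- decompose the nodup hypothesis
      obtain ⟨hndC, hndPR, hdisjC⟩ := List.nodup_append.mp hnodup
      obtain ⟨hpnr, hndR⟩ := List.nodup_cons.mp hndPR
      have hrestM : ∀ x ∈ rest, x ∈ pvVs seen := by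
        intro x hx
        rw [hVs]
        exact Or.inr (by simp [hx])
      have hcompM : ∀ x ∈ comp, x ∈ pvVs seen := by
        intro x hx
        rw [hVs]
        exact Or.inr (by simp [hx])
      have hpM : (r, c) ∈ pvVs seen := by
        rw [hVs]
        exact Or.inr (by simp)
      have hnewfresh : ∀ x ∈ new, x ∉ pvVs seen := fun x hx => (e5 x hx).2
      -- apply the induction hypothesis
      have happ := ihf (new.reverse ++ rest) st.1 (comp ++ [(r, c)]) e2 ?_ ?_ ?_ ?_ ?_ ?_
      · exact happ
      · -- seen set
        rw [e3, hVs]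
        ext x
        simp only [Set.mem_union, Set.mem_setOf_eq, List.mem_append, List.mem_cons,
          List.mem_reverse, List.mem_singleton]
        tauto
      · -- nodup
        rw [List.nodup_append]
        refine ⟨?_, ?_, ?_⟩
        · rw [List.nodup_append]
          refine ⟨hndC, List.nodup_singleton _, ?_⟩
          intro a ha b hb
          rw [List.mem_singleton] at hb
          subst hb
          exact hdisjC a ha (r, c) List.mem_cons_self
        · rw [List.nodup_append]
          refine ⟨List.nodup_reverse.mpr e4, hndR, ?_⟩
          intro a ha b hb
          rw [List.mem_reverse] at ha
          intro heq
          subst heq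
          exact hnewfresh a ha (hrestM a hb)
        · intro a ha b hb
          rw [List.mem_append, List.mem_singleton] at ha
          rw [List.mem_append, List.mem_reverse] at hb
          intro heq
          subst heq
          rcases hb with hb | hb
          · rcases ha with ha | ha
            · exact hnewfresh a hb (hcompM a ha)
            · subst ha
              exact hnewfresh _ hb hpM
          · rcases ha with ha | ha
            · exact hdisjC a ha a (List.mem_cons_of_mem _ hb) rfl
            · subst ha
              exact hpnr hb
      · -- reach
        intro x hx
        simp only [List.mem_append, List.mem_singleton, List.mem_reverse] at hx
        rcases hx with (hx | hx) | (hx | hx)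
        · exact hreach x (by simp [hx])
        · subst hx; exact hpR
        · have hxK : x ∉ K := by
            intro hxK
            exact hnewfresh x hx (by rw [hVs]; exact Or.inl hxK)
          exact pvReach_closed hpR (e5 x hx).1 hxK
        · exact hreach x (by simp [hx])
      · -- frontier
        intro y hy w hadj
        rw [List.mem_append, List.mem_singleton] at hy
        rcases hy with hy | hy
        · have := hfront y hy w hadj
          rw [e3]
          exact Or.inl this
        · subst hy
          have hwn : w ∈ [(r, c - 1), (r, c + 1), (r - 1, c), (r + 1, c)] :=
            pvNbr_mem_list hadj.2.2.2
          exact e6 w hwn hadj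
      · -- u0 membership
        simp only [List.mem_append, List.mem_cons] at hu0
        simp only [List.mem_append, List.mem_singleton, List.mem_reverse]
        tauto
      · -- fuel
        have hsubnew : {x | x ∈ new} ⊆ pvGrid R C \ pvVs seen := by
          intro x hx
          exact ⟨(e5 x hx).1.2.1, (e5 x hx).2⟩
        have hdiffeq : pvGrid R C \ pvVs st.1 = (pvGrid R C \ pvVs seen) \ {x | x ∈ new} := by
          rw [e3]
          ext x
          simp only [Set.mem_diff, Set.mem_union, Set.mem_setOf_eq]
          tauto
        have hcardeq : (pvGrid R C \ pvVs st.1).ncard + new.length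
            = (pvGrid R C \ pvVs seen).ncard := by
          rw [hdiffeq, ← pvList_ncard e4]
          exact Set.ncard_diff_add_ncard_of_subset hsubnew ((pvGrid_finite R C).diff)
        have hlen : (new.reverse ++ rest).length = new.length + rest.length := by
          simp
        have hfuel0 : 2 * (pvGrid R C \ pvVs seen).ncard + (rest.length + 1) < fuel + 1 := by
          simpa using hfuel
        omega

theorem pvPaint_fold (R C : Int) (size : Int) :
    ∀ (l : List (Int × Int)) (res : List (List Int)), pvDims R C res →
      (∀ x ∈ l, pvInR R C x) →
      pvDims R C (l.foldl (fun r x => pvSet2 r x.1 x.2 size) res) ∧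
      ∀ p : Int × Int, pvInR R C p →
        pvGet2 (l.foldl (fun r x => pvSet2 r x.1 x.2 size) res) p.1 p.2 0
          = if p ∈ l then size else pvGet2 res p.1 p.2 0 := by
  intro l
  induction l with
  | nil =>
    intro res hdims _
    refine ⟨hdims, fun p hp => ?_⟩
    simp
  | cons x l' ih =>
    intro res hdims hl
    have hx : pvInR R C x := hl x List.mem_cons_self
    have hdims1 : pvDims R C (pvSet2 res x.1 x.2 size) := pvDims_set2 hdims _ _ _
    obtain ⟨ih1, ih2⟩ := ih (pvSet2 res x.1 x.2 size) hdims1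
      (fun y hy => hl y (List.mem_cons_of_mem x hy))
    rw [List.foldl_cons]
    refine ⟨ih1, fun p hp => ?_⟩
    rw [ih2 p hp]
    by_cases hpl : p ∈ l'
    · rw [if_pos hpl, if_pos (List.mem_cons_of_mem x hpl)]
    · rw [if_neg hpl]
      by_cases hpx : p = x
      · rw [hpx, pvGet2_set2_self' hdims hx, if_pos List.mem_cons_self]
      · rw [pvGet2_set2_ne' hx hp hpx, if_neg (by simp [hpx, hpl])]

theorem pvB_loop (m : List (List Int)) (R C : Int) (hR : 0 ≤ R) (hC : 0 ≤ C) :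
    pvDims R C ((PySem.List.pyRange 0 R 1).foldl
      (fun (st : List (List Int) × List (List Bool)) i =>
        (PySem.List.pyRange 0 C 1).foldl
          (fun (st : List (List Int) × List (List Bool)) j =>
            if pvGet2 st.2 i j true = false then
              let seen1 := pvSet2 st.2 i j true
              let fl := pvFlood m R C (2 * R.toNat * C.toNat + 2) [(i, j)] seen1 []
              let size : Int := (fl.2.length : Int) - 1
              (fl.2.foldl (fun res rc => pvSet2 res rc.1 rc.2 size) st.1, fl.1)
            else st)
          st)
      (List.replicate R.toNat (List.replicate C.toNat (0 : Int)),
       List.replicate R.toNat (List.replicate C.toNat false))).1 ∧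
    ∀ p : Int × Int, pvInR R C p →
      pvGet2 ((PySem.List.pyRange 0 R 1).foldl
        (fun (st : List (List Int) × List (List Bool)) i =>
          (PySem.List.pyRange 0 C 1).foldl
            (fun (st : List (List Int) × List (List Bool)) j =>
              if pvGet2 st.2 i j true = false then
                let seen1 := pvSet2 st.2 i j true
                let fl := pvFlood m R C (2 * R.toNat * C.toNat + 2) [(i, j)] seen1 []
                let size : Int := (fl.2.length : Int) - 1
                (fl.2.foldl (fun res rc => pvSet2 res rc.1 rc.2 size) st.1, fl.1)
              else st)
            st)
        (List.replicate R.toNat (List.replicate C.toNat (0 : Int)),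
         List.replicate R.toNat (List.replicate C.toNat false))).1 p.1 p.2 0 = pvF m R C p := by
  have hsymm := pvAdj_symm' m R C
  have hgood := pvAdj_good m R C
  have hmain := pvLoop2_inv
    (fun i j st => pvDims R C st.1 ∧ pvDims R C st.2 ∧
      pvSat (pvAdj m R C) (∅ : Set (Int × Int)) (pvVs st.2) ∧
      (∀ p : Int × Int, pvInR R C p →
        ((p.1 < (i : Int) ∨ (p.1 = (i : Int) ∧ p.2 < (j : Int))) → p ∈ pvVs st.2)) ∧
      (∀ p : Int × Int, pvInR R C p →
        (p ∈ pvVs st.2 → pvGet2 st.1 p.1 p.2 0 = pvF m R C p) ∧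
        (p ∉ pvVs st.2 → pvGet2 st.1 p.1 p.2 0 = 0)))
    R C
    (fun st i j =>
      if pvGet2 st.2 i j true = false then
        let seen1 := pvSet2 st.2 i j true
        let fl := pvFlood m R C (2 * R.toNat * C.toNat + 2) [(i, j)] seen1 []
        let size : Int := (fl.2.length : Int) - 1
        (fl.2.foldl (fun res rc => pvSet2 res rc.1 rc.2 size) st.1, fl.1)
      else st)
    (List.replicate R.toNat (List.replicate C.toNat (0 : Int)),
     List.replicate R.toNat (List.replicate C.toNat false))
    ?_ ?_ ?_
  · obtain ⟨m1, m2, m3, m4, m5⟩ := hmain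
    refine ⟨m1, fun p hp => ?_⟩
    exact (m5 p hp).1 (m4 p hp (Or.inl (by obtain ⟨a, b, _, _⟩ := hp; omega)))
  · refine ⟨pvDims_replicate R C 0, pvDims_replicate R C false, ?_, ?_, ?_⟩
    · rw [pvVs_replicate]
      intro y hy
      exact absurd hy (Set.notMem_empty y)
    · intro p hp hcond
      obtain ⟨a, b, _, _⟩ := hp
      simp only [Int.natCast_zero] at hcond
      omega
    · intro p hp
      rw [pvVs_replicate]
      exact ⟨fun h => absurd h (Set.notMem_empty p), fun _ => pvGet2_replicate hp 0 0⟩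
  · intro i j st hi hj hP
    dsimp only
    obtain ⟨hd1, hd2, hSatK, hproc, hvals⟩ := hP
    have hu : pvInR R C ((i : Int), (j : Int)) := ⟨by omega, by omega, by omega, by omega⟩
    by_cases hseen : pvGet2 st.2 (i : Int) (j : Int) true = false
    · rw [if_pos hseen]
      have hfreshu : ((i : Int), (j : Int)) ∉ pvVs st.2 := (notmem_pvVs hd2 hu).mpr hseen
      have hd2' : pvDims R C (pvSet2 st.2 (i : Int) (j : Int) true) := pvDims_set2 hd2 _ _ _
      have hVs1 : pvVs (pvSet2 st.2 (i : Int) (j : Int) true)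
          = pvVs st.2 ∪ {((i : Int), (j : Int))} := pvVs_set2_true hd2 hu
      obtain ⟨F1, F2, F3, F4⟩ := pvFlood_ok m R C (pvVs st.2) ((i : Int), (j : Int))
        (2 * R.toNat * C.toNat + 2) [((i : Int), (j : Int))]
        (pvSet2 st.2 (i : Int) (j : Int) true) [] hd2'
        (by rw [hVs1]; congr 1; ext x; simp)
        (by simp)
        (by intro x hx
            simp only [List.nil_append, List.mem_singleton] at hx
            rw [hx]
            exact pvReach_self hu hfreshu)
        (by intro y hy; exact absurd hy (List.not_mem_nil))
        (by simp)
        (by have h1 : (pvGrid R C \ pvVs (pvSet2 st.2 (i : Int) (j : Int) true)).ncard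
                ≤ (pvGrid R C).ncard :=
              Set.ncard_le_ncard Set.diff_subset (pvGrid_finite R C)
            rw [pvGrid_ncard hR hC] at h1
            simp only [List.length_singleton]
            have h2 : 2 * R.toNat * C.toNat = 2 * (R.toNat * C.toNat) := by ring
            rw [h2]
            omega)
      have hTK : pvReach (pvAdj m R C) (pvInR R C) (pvVs st.2) ((i : Int), (j : Int))
          = pvReach (pvAdj m R C) (pvInR R C) (∅ : Set (Int × Int)) ((i : Int), (j : Int)) := by
        have := pvReach_avoid_union hsymm hgood hSatK hfreshu
        rwa [Set.empty_union] at this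
      set fl := pvFlood m R C (2 * R.toNat * C.toNat + 2) [((i : Int), (j : Int))]
        (pvSet2 st.2 (i : Int) (j : Int) true) [] with hfl
      have hlen : (fl.2.length : Int)
          = ((pvReach (pvAdj m R C) (pvInR R C) (pvVs st.2) ((i : Int), (j : Int))).ncard : Int) := by
        rw [← pvList_ncard F3, F4]
      have hinT : ∀ x ∈ fl.2, pvInR R C x := by
        intro x hx
        have : x ∈ pvReach (pvAdj m R C) (pvInR R C) (pvVs st.2) ((i : Int), (j : Int)) := by
          rw [← F4]; exact hx
        exact pvReach_good hgood this
      obtain ⟨P1, P2⟩ := pvPaint_fold R C ((fl.2.length : Int) - 1) fl.2 st.1 hd1 hinT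
      refine ⟨P1, F1, ?_, ?_, ?_⟩
      · rw [F2]
        exact pvSat_union hSatK (hTK ▸ pvSat_reach _ _ _ _)
      · intro p hp hcond
        rw [F2]
        by_cases hpu : p = ((i : Int), (j : Int))
        · rw [hpu]
          exact Or.inr (pvReach_self hu hfreshu)
        · left
          apply hproc p hp
          have hne : p.1 ≠ (i : Int) ∨ p.2 ≠ (j : Int) := by
            by_contra hcon
            push_neg at hcon
            exact hpu (Prod.ext_iff.mpr ⟨hcon.1, hcon.2⟩)
          push_cast at hcond ⊢
          rcases hne with h | h <;> rcases hcond with hc | hc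
          · left; omega
          · left; omega
          · left; omega
          · right; exact ⟨hc.1, by omega⟩
      · intro p hp
        by_cases hpT : p ∈ pvReach (pvAdj m R C) (pvInR R C) (pvVs st.2) ((i : Int), (j : Int))
        · have hpl : p ∈ fl.2 := by
            have : p ∈ {x | x ∈ fl.2} := by rw [F4]; exact hpT
            exact this
          constructor
          · intro _
            rw [P2 p hp, if_pos hpl]
            have hcomp : pvReach (pvAdj m R C) (pvInR R C) (∅ : Set (Int × Int)) p
                = pvReach (pvAdj m R C) (pvInR R C) (∅ : Set (Int × Int)) ((i : Int), (j : Int)) :=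
              pvReach_comp_eq hsymm hgood (hTK ▸ hpT)
            rw [hlen]
            unfold pvF
            rw [hcomp, hTK]
          · intro hcon
            rw [F2] at hcon
            exact absurd (Or.inr hpT) hcon
        · have hpl : p ∉ fl.2 := by
            intro hx
            apply hpT
            have : p ∈ {x | x ∈ fl.2} := hx
            rw [F4] at this
            exact this
          constructor
          · intro hmem
            rw [F2] at hmem
            rcases hmem with hmem | hmem
            · rw [P2 p hp, if_neg hpl]
              exact (hvals p hp).1 hmem
            · exact absurd hmem hpT
          · intro hcon
            rw [F2] at hcon
            rw [P2 p hp, if_neg hpl]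
            exact (hvals p hp).2 (fun h => hcon (Or.inl h))
    · rw [if_neg hseen]
      have hmemu : ((i : Int), (j : Int)) ∈ pvVs st.2 := by
        rw [mem_pvVs hd2 hu]
        cases hgg : pvGet2 st.2 (i : Int) (j : Int) true
        · exact absurd hgg hseen
        · rfl
      refine ⟨hd1, hd2, hSatK, ?_, hvals⟩
      intro p hp hcond
      by_cases hpu : p = ((i : Int), (j : Int))
      · rw [hpu]; exact hmemu
      · apply hproc p hp
        have hne : p.1 ≠ (i : Int) ∨ p.2 ≠ (j : Int) := by
          by_contra hcon
          push_neg at hcon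
          exact hpu (Prod.ext_iff.mpr ⟨hcon.1, hcon.2⟩)
        push_cast at hcond ⊢
        rcases hne with h | h <;> rcases hcond with hc | hc
        · left; omega
        · left; omega
        · left; omega
        · right; exact ⟨hc.1, by omega⟩
  · intro i st hi hP
    obtain ⟨hd1, hd2, hSatK, hproc, hvals⟩ := hP
    refine ⟨hd1, hd2, hSatK, ?_, hvals⟩
    intro p hp hcond
    apply hproc p hp
    obtain ⟨a, b, c, d⟩ := hp
    push_cast at hcond ⊢
    omega
theorem count_friendly_elements_eq (matrix : List (List Int)) :
    count_friendly_elements matrix = count_friendly_elements_alt matrix := by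
  have hR : (0 : Int) ≤ (matrix.length : Int) := Int.natCast_nonneg _
  have hC : (0 : Int) ≤ (if 0 < (matrix.length : Int)
      then ((matrix.headD []).length : Int) else 0) := by
    split_ifs
    · exact Int.natCast_nonneg _
    · exact le_refl 0
  obtain ⟨dA, vA⟩ := pvA_loop matrix (matrix.length : Int)
    (if 0 < (matrix.length : Int) then ((matrix.headD []).length : Int) else 0) hR hC
  obtain ⟨dB, vB⟩ := pvB_loop matrix (matrix.length : Int)
    (if 0 < (matrix.length : Int) then ((matrix.headD []).length : Int) else 0) hR hC
  exact pvGrid_ext dA dB (fun p hp => (vA p hp).trans (vB p hp).symm)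

-- ===== VERDICT (by name: the statement is the Claim_ definition above) =====
theorem count_friendly_elements_spec : Claim_equal_count_friendly_elements := by
  intro matrix _ _
  exact count_friendly_elements_eq matrix
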